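-- pv_equiv track=rewrite | github.com/dantetemplar/competitive-programming | Codeforces - Codeforces Round 1050 (Div. 4)/G_Последнее_желание_фермера_Джона.py | solve
-- ===== SOURCE A (Python) =====
-- import math
--
-- def solve(n: int, A: list[int]) -> list[int]:
--     res = []
--     current_gcd = 0
--     count = 0
--     for i in range(n):
--         prev_gcd = current_gcd
--         current_gcd = math.gcd(current_gcd, A[i])
--         if i > 0 and current_gcd < prev_gcd:
--             count += 1
--         res.append(count)
--     return res
-- ===== SOURCE B (Python) =====
-- import math
--
--
-- def solve(n: int, A: list[int]) -> list[int]: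
--     # Segment (run-length) algorithm: the prefix gcd is piecewise constant and
--     # changes at most O(log max|A|) times, so process one constant segment at a
--     # time and emit the answer in blocks instead of element by element.
--     xs = [A[i] for i in range(n)]
--     out = []
--     g = 0
--     count = 0
--     while xs:
--         h = math.gcd(g, xs[0])
--         if h < g:
--             count += 1
--         run = 1
--         while run < len(xs) and math.gcd(h, xs[run]) == h:
--             run += 1
--         out += [count] * run
--         g = h
--         xs = xs[run:]
--     return out
-- ===== Notes on version B (the rewrite author's own statement) =====
-- stated objective: alternative
-- what changed: A updates a gcd and a drop counter once per element and appends one value per iteration; B is a segment/run-length algorithm: it exploits that the prefix gcd is piecewise constant, scans for the length of each maximal constant-gcd run with an inner loop, and emits the answer in blocks [count]*run, advancing segment by segment.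
import Mathlib
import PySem

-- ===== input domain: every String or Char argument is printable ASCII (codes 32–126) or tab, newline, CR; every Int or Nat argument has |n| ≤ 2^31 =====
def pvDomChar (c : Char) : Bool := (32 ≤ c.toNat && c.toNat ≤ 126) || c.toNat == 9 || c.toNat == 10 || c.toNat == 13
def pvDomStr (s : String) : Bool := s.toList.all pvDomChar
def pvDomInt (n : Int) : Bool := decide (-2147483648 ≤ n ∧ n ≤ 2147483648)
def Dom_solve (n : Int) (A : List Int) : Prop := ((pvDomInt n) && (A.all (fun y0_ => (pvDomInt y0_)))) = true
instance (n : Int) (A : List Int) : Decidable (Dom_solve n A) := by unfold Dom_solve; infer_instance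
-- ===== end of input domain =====

-- B replaces A's per-element loop (gcd + drop counter, one append per index) by a segment/run-length
-- algorithm over the piecewise-constant prefix gcd, emitting the answer in blocks; alternative decomposition.

-- ===== PORT A =====
-- one loop iteration of A: prev/current gcd, drop counter, res.append(count)
def solveStep (A : List Int) (st : List Int × Int × Int) (i : Int) : List Int × Int × Int :=
  let prev := st.2.1
  let g : Int := Int.gcd st.2.1 (PySem.List.pyGetD A i 0)
  let cnt' := if 0 < i ∧ g < prev then st.2.2 + 1 else st.2.2
  (st.1 ++ [cnt'], g, cnt')

def solve (n : Int) (A : List Int) : List Int :=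
  ((PySem.List.pyRange 0 n 1).foldl (solveStep A) ([], 0, 0)).1

-- ===== PORT B =====
-- inner while: run < len(xs) and gcd(h, xs[run]) == h: run += 1   (fuel = len(xs) bounds the loop)
def bRun (h : Int) (xs : List Int) : Nat → Int → Int
  | 0, run => run
  | fuel + 1, run =>
    if run < (xs.length : Int) ∧ (Int.gcd h (PySem.List.pyGetD xs run 0) : Int) = h
    then bRun h xs fuel (run + 1)
    else run

-- outer while xs: one segment per iteration (fuel = len(xs) bounds the loop, since run ≥ 1)
def bLoop (g count : Int) (xs out : List Int) : Nat → List Int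
  | 0 => out
  | fuel + 1 =>
    match xs with
    | [] => out
    | x :: _ =>
      let h : Int := Int.gcd g x
      let count' := if h < g then count + 1 else count
      let run := bRun h xs xs.length 1
      bLoop h count' (PySem.List.slice xs (some run) none)
        (out ++ List.replicate run.toNat count') fuel

def solve_alt (n : Int) (A : List Int) : List Int :=
  let xs := (PySem.List.pyRange 0 n 1).map (fun i => PySem.List.pyGetD A i 0)
  bLoop 0 0 xs [] xs.length

-- ===== PRECONDITION & SPEC =====
-- Pre_ excludes n > len(A), where A raises IndexError on A[i].
def Pre_solve (n : Int) (A : List Int) : Prop := n ≤ (A.length : Int)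
instance (n : Int) (A : List Int) : Decidable (Pre_solve n A) := by unfold Pre_solve; infer_instance
def pvWitness_solve : Int × List Int := (3, [12, 18, 18])

def Spec_solve (n : Int) (A : List Int) (out : List Int) : Prop := out = solve_alt n A
instance (n : Int) (A : List Int) (out : List Int) : Decidable (Spec_solve n A out) := by unfold Spec_solve; infer_instance

-- ===== CLAIM (what is proved, stated in full; the proofs are below) =====
def Claim_equal_solve : Prop := ∀ (n : Int) (A : List Int), Dom_solve n A → Pre_solve n A → Spec_solve n A (solve n A)

-- ===== LEMMAS AND PROOFS =====

-- reference recursion: running gcd + counter over the VALUES, output list only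
def coreRun (c cnt : Int) : List Int → List Int
  | [] => []
  | x :: xs =>
    let g : Int := Int.gcd c x
    let cnt' := if g < c then cnt + 1 else cnt
    cnt' :: coreRun g cnt' xs

-- A's loop body on an (index, value) pair
def pairStep (st : List Int × Int × Int) (p : Int × Int) : List Int × Int × Int :=
  let g : Int := Int.gcd st.2.1 p.2
  let cnt' := if 0 < p.1 ∧ g < st.2.1 then st.2.2 + 1 else st.2.2
  (st.1 ++ [cnt'], g, cnt')

def cFinal (c : Int) : List Int → Int
  | [] => c
  | x :: xs => cFinal (Int.gcd c x : Int) xs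

def cntFinal (c cnt : Int) : List Int → Int
  | [] => cnt
  | x :: xs =>
    cntFinal (Int.gcd c x : Int) (if (Int.gcd c x : Int) < c then cnt + 1 else cnt) xs

-- A's fold over enumerate (positive start) is coreRun
theorem enum_fold_eq (xs : List Int) : ∀ (s : Int), 1 ≤ s → ∀ (res : List Int) (c cnt : Int),
    (PySem.List.enumerate xs s).foldl pairStep (res, c, cnt)
      = (res ++ coreRun c cnt xs, cFinal c xs, cntFinal c cnt xs) := by
  induction xs with
  | nil => intro s _ res c cnt; simp [PySem.List.enumerate_nil, coreRun, cFinal, cntFinal]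
  | cons x t ih =>
    intro s hs res c cnt
    have hpos : 0 < s := hs
    rw [PySem.List.enumerate_cons, List.foldl_cons]
    have hstep : pairStep (res, c, cnt) (s, x)
        = (res ++ [if (Int.gcd c x : Int) < c then cnt + 1 else cnt], (Int.gcd c x : Int),
           if (Int.gcd c x : Int) < c then cnt + 1 else cnt) := by
      simp [pairStep, hpos]
    rw [hstep, ih (s + 1) (by omega)]
    by_cases h : (Int.gcd c x : Int) < c <;> simp [coreRun, cFinal, cntFinal, h]

-- the inner while finds r + length of the maximal constant-gcd run of xs after index r
theorem bRun_eq (h : Int) (xs : List Int) : ∀ (fuel r : Nat), xs.length - r ≤ fuel →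
    bRun h xs fuel (r : Int)
      = (r : Int) + (((xs.drop r).takeWhile
          (fun y => decide ((Int.gcd h y : Int) = h))).length : Int) := by
  intro fuel
  induction fuel with
  | zero =>
    intro r hr
    have hdrop : xs.drop r = [] := List.drop_eq_nil_of_le (by omega)
    simp [bRun, hdrop]
  | succ fuel ih =>
    intro r hr
    by_cases hlen : r < xs.length
    · have hdrop : xs.drop r = xs[r] :: xs.drop (r + 1) := List.drop_eq_getElem_cons hlen
      have hget : PySem.List.pyGetD xs (r : Int) 0 = xs[r] := by
        simp [PySem.List.pyGetD_natCast, List.getD_eq_getElem?_getD, hlen]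
      by_cases hg : (Int.gcd h xs[r] : Int) = h
      · have hb : bRun h xs (fuel + 1) (r : Int) = bRun h xs fuel ((r : Int) + 1) := by
          have : (r : Int) < (xs.length : Int) := by exact_mod_cast hlen
          simp [bRun, hget, hg, this]
        rw [hb, show ((r : Int) + 1) = ((r + 1 : Nat) : Int) by push_cast; ring,
          ih (r + 1) (by omega), hdrop]
        simp [List.takeWhile, hg]
        omega
      · have hb : bRun h xs (fuel + 1) (r : Int) = (r : Int) := by
          simp [bRun, hget, hg]
        rw [hb, hdrop]
        simp [List.takeWhile, hg]
    · have hdrop : xs.drop r = [] := List.drop_eq_nil_of_le (by omega)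
      have hb : bRun h xs (fuel + 1) (r : Int) = (r : Int) := by
        have : ¬ ((r : Int) < (xs.length : Int)) := by omega
        simp [bRun, this]
      rw [hb, hdrop]
      simp

theorem drop_takeWhile_length (P : Int → Bool) (t : List Int) :
    t.drop (t.takeWhile P).length = t.dropWhile P := by
  induction t with
  | nil => rfl
  | cons y s ih => by_cases h : P y <;> simp [List.takeWhile, List.dropWhile, h, ih]

-- over a run with constant gcd, coreRun emits cnt repeatedly and keeps its state
theorem coreRun_const (h cnt : Int) (pre rest : List Int)
    (hpre : ∀ y ∈ pre, (Int.gcd h y : Int) = h) :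
    coreRun h cnt (pre ++ rest) = List.replicate pre.length cnt ++ coreRun h cnt rest := by
  induction pre with
  | nil => simp
  | cons y t ih =>
    have hy : (Int.gcd h y : Int) = h := hpre y List.mem_cons_self
    simp [coreRun, hy, List.replicate_succ]
    exact ih (fun z hz => hpre z (List.mem_cons_of_mem _ hz))

-- the segment loop computes coreRun
theorem bLoop_eq : ∀ (fuel : Nat) (xs : List Int), xs.length ≤ fuel →
    ∀ (g cnt : Int) (out : List Int), bLoop g cnt xs out fuel = out ++ coreRun g cnt xs := by
  intro fuel
  induction fuel with
  | zero =>
    intro xs hxs g cnt out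
    have : xs = [] := List.eq_nil_of_length_eq_zero (by omega)
    simp [this, bLoop, coreRun]
  | succ fuel ih =>
    intro xs hxs g cnt out
    match xs with
    | [] => simp [bLoop, coreRun]
    | x :: t =>
      set P : Int → Bool := fun y => decide ((Int.gcd (Int.gcd g x : Int) y : Int) = (Int.gcd g x : Int)) with hP
      have hrun : bRun (Int.gcd g x : Int) (x :: t) (x :: t).length 1
          = ((1 + (t.takeWhile P).length : Nat) : Int) := by
        have h1 : ((1 : Nat) : Int) = (1 : Int) := by norm_num
        rw [← h1, bRun_eq (Int.gcd g x : Int) (x :: t) (x :: t).length 1 (by simp)]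
        simp [hP]
      have hsplit : t = t.takeWhile P ++ t.dropWhile P := (List.takeWhile_append_dropWhile).symm
      have hslice : PySem.List.slice (x :: t) (some (((1 + (t.takeWhile P).length : Nat) : Int))) none
          = t.dropWhile P := by
        rw [PySem.List.slice_from_natCast]
        rw [show (1 + (t.takeWhile P).length) = (t.takeWhile P).length + 1 by omega]
        rw [List.drop_succ_cons]
        exact drop_takeWhile_length P t
      have hlen' : (t.dropWhile P).length ≤ fuel := by
        have := (List.dropWhile_sublist (p := P) (l := t)).length_le
        simp at hxs
        omega
      simp only [bLoop, hrun, hslice]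
      rw [ih (t.dropWhile P) hlen']
      have hpre : ∀ y ∈ t.takeWhile P, (Int.gcd (Int.gcd g x : Int) y : Int) = (Int.gcd g x : Int) := by
        intro y hy
        have := List.mem_takeWhile_imp hy
        simpa [hP] using this
      have hcore : coreRun g cnt (x :: t)
          = (if (Int.gcd g x : Int) < g then cnt + 1 else cnt)
            :: (List.replicate (t.takeWhile P).length (if (Int.gcd g x : Int) < g then cnt + 1 else cnt)
               ++ coreRun (Int.gcd g x : Int) (if (Int.gcd g x : Int) < g then cnt + 1 else cnt) (t.dropWhile P)) := by
        conv_lhs => rw [show (x :: t) = x :: (t.takeWhile P ++ t.dropWhile P) by rw [← hsplit]]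
        simp only [coreRun]
        rw [coreRun_const _ _ _ _ hpre]
      rw [hcore]
      have hnat : ((1 + (t.takeWhile P).length : Nat) : Int).toNat = 1 + (t.takeWhile P).length := by
        omega
      rw [hnat, List.replicate_add]
      simp

-- A's whole enumerate-fold from the initial state is coreRun (the i = 0 drop test is vacuous)
theorem fold_enum_zero (ys : List Int) :
    ((PySem.List.enumerate ys 0).foldl pairStep ([], 0, 0)).1 = coreRun 0 0 ys := by
  match ys with
  | [] => simp [PySem.List.enumerate_nil, coreRun]
  | x :: rest =>
    rw [PySem.List.enumerate_cons, List.foldl_cons]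
    have hfirst : pairStep ([], 0, 0) (0, x) = ([(0 : Int)], (Int.gcd 0 x : Int), 0) := by
      simp [pairStep]
    rw [hfirst, show ((0 : Int) + 1) = 1 by norm_num,
      enum_fold_eq rest 1 (by omega) [0] (Int.gcd 0 x : Int) 0]
    have hnd : ¬ (|x| < (0 : Int)) := not_lt.2 (abs_nonneg x)
    simp [coreRun, hnd]

-- ===== VERDICT (by name: the statement is the Claim_ definition above) =====
theorem solve_spec : Claim_equal_solve := by
  unfold Claim_equal_solve
  intro n A _ hpre
  unfold Spec_solve
  by_cases hn : n ≤ 0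
  · simp [solve, solve_alt, PySem.List.pyRange_one_eq_nil hn, bLoop]
  · replace hn : 0 < n := by omega
    have hpre' : n ≤ (A.length : Int) := hpre
    set xs := A.take n.toNat with hxsdef
    have hlen : (xs.length : Int) = n := by
      simp [hxsdef]
      omega
    have hget : ∀ i ∈ PySem.List.pyRange 0 n 1,
        PySem.List.pyGetD A i 0 = PySem.List.pyGetD xs i 0 := by
      intro i hi
      rw [PySem.List.mem_pyRange_one] at hi
      have h0 : 0 ≤ i := hi.1
      have hiA : i < (A.length : Int) := lt_of_lt_of_le hi.2 hpre'
      obtain ⟨k, rfl⟩ : ∃ k : ℕ, i = (k : Int) := ⟨i.toNat, by omega⟩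
      have hk : k < n.toNat := by omega
      simp [hxsdef, List.getD_eq_getElem?_getD, hk]
    have hmap : (PySem.List.pyRange 0 n 1).map (fun i => PySem.List.pyGetD A i 0) = xs := by
      rw [List.map_congr_left hget]
      rw [show PySem.List.pyRange 0 n 1 = PySem.List.pyRange 0 (xs.length : Int) 1 by rw [hlen]]
      exact PySem.List.map_pyGetD_pyRange_zero' xs 0
    -- A's loop = coreRun 0 0 xs
    have hA : solve n A = coreRun 0 0 xs := by
      unfold solve
      rw [show (PySem.List.pyRange 0 n 1).foldl (solveStep A) ([], 0, 0)
            = (PySem.List.pyRange 0 n 1).foldl (solveStep xs) ([], 0, 0) by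
        apply PySem.List.foldl_congr_mem
        intro acc i hi
        simp [solveStep, hget i hi]]
      rw [show PySem.List.pyRange 0 n 1 = PySem.List.pyRange 0 (xs.length : Int) 1 by rw [hlen]]
      rw [show List.foldl (solveStep xs) ([], (0 : Int), (0 : Int))
            (PySem.List.pyRange 0 (xs.length : Int) 1)
          = ((PySem.List.enumerate xs 0).foldl pairStep ([], 0, 0)) by
        rw [PySem.List.enumerate_eq_map_pyRange xs 0, List.foldl_map]
        rfl]
      exact fold_enum_zero xs
    -- B's segment loop = coreRun 0 0 xs
    have hB : solve_alt n A = coreRun 0 0 xs := by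
      unfold solve_alt
      simp only [hmap]
      exact bLoop_eq xs.length xs le_rfl 0 0 []
    rw [hA, hB]
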